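-- pv_equiv track=rewrite | github.com/krishanavatar-infrrd/aws-profile-switcher | aws_profile_manager/aws/credentials.py | _parse_credentials
-- ===== SOURCE A (Python) =====
-- from typing import Dict, Optional, Tuple
--
-- def _parse_credentials(content: str) -> Dict[str, Dict[str, str]]:
--     """Parse credentials from base file content"""
--     credentials = {}
--     current_profile = None
--
--     for line in content.split('\n'):
--         line = line.strip()
--         if line.startswith('[') and line.endswith(']'):
--             current_profile = line[1:-1]
--             credentials[current_profile] = {}
--         elif '=' in line and current_profile:
--             key, value = line.split('=', 1)
--             credentials[current_profile][key.strip()] = value.strip()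
--
--     return credentials
-- ===== SOURCE B (Python) =====
-- def _parse_credentials(content: str):
--     """Parse credentials from base file content (two-phase: group lines by header, then fill)."""
--     stripped = [ln.strip() for ln in content.split('\n')]
--     groups = []
--     for ln in stripped:
--         if ln.startswith('[') and ln.endswith(']'):
--             groups.append((ln[1:-1], []))
--         elif groups:
--             groups[-1][1].append(ln)
--     credentials = {}
--     for name, body in groups:
--         credentials[name] = {}
--         for ln in body:
--             if '=' in ln:
--                 key, value = ln.split('=', 1)
--                 credentials[name][key.strip()] = value.strip()
--     return credentials
-- ===== Notes on version B (the rewrite author's own statement) =====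
-- stated objective: alternative
-- what changed: Replaces A's single stateful pass (current-profile variable, filling the dict line by line) with a two-phase decomposition: first partition the stripped lines into (header, body-lines) groups, dropping pre-header lines, then build the credentials dict group by group.
-- intended difference: On inputs whose last empty-name section header (a stripped line '[]') is followed by a '='-line before the next header, A leaves credentials[''] empty (the empty profile name '' is falsy, so 'and current_profile' silently drops the section's key=value lines) while B fills the section in; B's value is intended since A deliberately created the '' entry. — e.g. on _parse_credentials("[]\na = b"): A returns [("", [])], B returns [("", [("a", "b")])]
import Mathlib
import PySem

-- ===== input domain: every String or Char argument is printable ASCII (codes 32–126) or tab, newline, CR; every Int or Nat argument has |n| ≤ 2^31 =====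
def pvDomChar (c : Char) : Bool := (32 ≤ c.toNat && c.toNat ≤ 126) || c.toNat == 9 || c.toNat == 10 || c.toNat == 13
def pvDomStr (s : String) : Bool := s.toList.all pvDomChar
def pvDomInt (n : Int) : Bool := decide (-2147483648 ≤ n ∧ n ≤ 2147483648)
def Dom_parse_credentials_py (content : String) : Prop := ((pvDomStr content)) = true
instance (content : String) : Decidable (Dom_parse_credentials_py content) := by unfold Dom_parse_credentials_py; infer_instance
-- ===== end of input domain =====

-- B replaces A's single stateful pass with a two-phase decomposition (group lines by header, then fill);
-- same cost, no speed claim; on empty-name '[]' sections (D_ below) B fills the section where A drops it.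

abbrev pvDD := PySem.Dict String (PySem.Dict String String)

-- ===== PORT A =====
-- one loop step of A: strip the line, header / key-value / skip (state = (credentials, current_profile))
def pvAStep (st : pvDD × Option String) (line0 : String) : pvDD × Option String :=
  let line := PySem.Str.strip line0
  if PySem.Str.startswith line "[" && PySem.Str.endswith line "]" then
    let p := PySem.Str.slice line (some 1) (some (-1))
    (st.1.insert p PySem.Dict.empty, some p)
  else
    match st.2 with
    | some p =>
      -- '=' in line and current_profile  (truthiness: None and "" are falsy)
      if PySem.Str.isIn "=" line && p != "" then
        match PySem.Str.splitMax? line "=" 1 with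
        | some (k :: v :: _) =>
          -- credentials[current_profile][key.strip()] = value.strip(); the key is always present here,
          -- so Dict.modify's default is never consulted (exact)
          (st.1.modify p PySem.Dict.empty (fun d => d.insert (PySem.Str.strip k) (PySem.Str.strip v)), some p)
        | _ => (st.1, some p)   -- unreachable: '=' in line gives exactly two parts
      else (st.1, some p)
    | none => (st.1, none)

def parse_credentials_py (content : String) : List (String × List (String × String)) :=
  -- content.split('\n'): sep ≠ "", so split? is always some; getD [] is never consulted
  ((((PySem.Str.split? content "\n").getD []).foldl pvAStep (PySem.Dict.empty, none)).1).items.map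
    (fun p => (p.1, p.2.items))

-- ===== PORT B =====
-- groups[-1][1].append(ln)
def pvAddLast (gs : List (String × List String)) (ln : String) : List (String × List String) :=
  match gs with
  | [] => []
  | [(p, body)] => [(p, body ++ [ln])]
  | g :: rest => g :: pvAddLast rest ln

-- phase 1: partition stripped lines into (header-name, body-lines) groups
def pvBGroupStep (gs : List (String × List String)) (ln : String) : List (String × List String) :=
  if PySem.Str.startswith ln "[" && PySem.Str.endswith ln "]" then
    gs ++ [(PySem.Str.slice ln (some 1) (some (-1)), ([] : List String))]
  else if gs.isEmpty then gs
  else pvAddLast gs ln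

-- phase 2: fill one '='-line of a group into the credentials dict
def pvBFillLine (p : String) (d : pvDD) (ln : String) : pvDD :=
  if PySem.Str.isIn "=" ln then
    match PySem.Str.splitMax? ln "=" 1 with
    | some (k :: v :: _) => d.modify p PySem.Dict.empty (fun e => e.insert (PySem.Str.strip k) (PySem.Str.strip v))
    | _ => d
  else d

-- phase 2: one group — credentials[name] = {} then fill it from the body's '='-lines
def pvBGroupFill (d : pvDD) (g : String × List String) : pvDD :=
  g.2.foldl (pvBFillLine g.1) (d.insert g.1 PySem.Dict.empty)

def parse_credentials_py_alt (content : String) : List (String × List (String × String)) :=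
  let stripped := ((PySem.Str.split? content "\n").getD []).map PySem.Str.strip  -- sep ≠ "": always some
  let groups := stripped.foldl pvBGroupStep []
  ((groups.foldl pvBGroupFill PySem.Dict.empty).items).map (fun p => (p.1, p.2.items))

-- ===== PRECONDITION & SPEC =====
-- On inputs whose last empty-name section header (a stripped line '[]') is followed by a '='-line before
-- the next header, A leaves credentials[''] empty (the empty profile name '' is falsy, so
-- 'and current_profile' silently drops the section's key=value lines) while B fills the section in;
-- B's value is intended since A deliberately created the '' entry.
def D_parse_credentials_py (content : String) : Prop :=
  ∃ t ∈ (((PySem.Str.split? content "\n").getD []).map PySem.Str.strip).tails,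
    t.headD "" = "[]" ∧ "[]" ∉ t.tail ∧
    ((t.tail.takeWhile (fun x => !(x.toList.head? == some '[' && x.toList.getLast? == some ']'))).any
      (fun x => x.toList.contains '=')) = true
instance (content : String) : Decidable (D_parse_credentials_py content) := by
  unfold D_parse_credentials_py; infer_instance

def Spec_parse_credentials_py (content : String) (out : List (String × List (String × String))) : Prop :=
  ¬ D_parse_credentials_py content → out = parse_credentials_py_alt content
instance (content : String) (out : List (String × List (String × String))) : Decidable (Spec_parse_credentials_py content out) := by unfold Spec_parse_credentials_py; infer_instance

def pvDiffWitness_parse_credentials_py : String := "[]\na = b"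
def pvDiffWitnessOut_parse_credentials_py : (List (String × List (String × String))) × (List (String × List (String × String))) :=
  ([("", [])], [("", [("a", "b")])])

-- ===== CLAIM (what is proved, stated in full; the proofs are below) =====
def Claim_unchanged_parse_credentials_py : Prop := ∀ (content : String), Dom_parse_credentials_py content → Spec_parse_credentials_py content (parse_credentials_py content)
def Claim_exact_parse_credentials_py : Prop := ∀ (content : String), Dom_parse_credentials_py content → D_parse_credentials_py content → parse_credentials_py content ≠ parse_credentials_py_alt content
def Claim_changed_parse_credentials_py : Prop := Dom_parse_credentials_py (pvDiffWitness_parse_credentials_py) ∧ D_parse_credentials_py (pvDiffWitness_parse_credentials_py) ∧ parse_credentials_py (pvDiffWitness_parse_credentials_py) = pvDiffWitnessOut_parse_credentials_py.1 ∧ parse_credentials_py_alt (pvDiffWitness_parse_credentials_py) = pvDiffWitnessOut_parse_credentials_py.2 ∧ pvDiffWitnessOut_parse_credentials_py.1 ≠ pvDiffWitnessOut_parse_credentials_py.2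

-- ===== LEMMAS AND PROOFS =====

-- a stripped line that Python's branch treats as a section header (proof-side abbreviation)
def pvIsHdr (ln : String) : Bool := PySem.Str.startswith ln "[" && PySem.Str.endswith ln "]"

theorem pv_singleton_prefix (l : List Char) (c : Char) : [c] <+: l ↔ l.head? = some c := by
  constructor
  · rintro ⟨t, rfl⟩; rfl
  · intro h; cases l with
    | nil => simp at h
    | cons a t => simp at h; subst h; exact ⟨t, rfl⟩

theorem pv_singleton_suffix (l : List Char) (c : Char) : [c] <:+ l ↔ l.getLast? = some c := by
  constructor
  · rintro ⟨t, rfl⟩; simp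
  · intro h; rw [List.getLast?_eq_some_iff] at h; obtain ⟨l', rfl⟩ := h; exact ⟨l', rfl⟩

-- the head/last-character test of D_ is exactly the header test of the two programs
theorem pvHdrB_eq (x : String) :
    (x.toList.head? == some '[' && x.toList.getLast? == some ']') = pvIsHdr x := by
  unfold pvIsHdr
  rw [Bool.eq_iff_iff]
  simp only [Bool.and_eq_true, beq_iff_eq, PySem.Str.startswith_eq, PySem.Str.endswith_eq,
    PySem.Chars.startswith_iff, PySem.Chars.endswith_iff]
  rw [show "[".toList = ['['] from rfl, show "]".toList = [']'] from rfl,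
    pv_singleton_prefix, pv_singleton_suffix]

-- a header line whose sliced-out name is empty is exactly the line "[]"
theorem pvEmptyHdr (h : String) (hh : pvIsHdr h = true)
    (hs : PySem.Str.slice h (some 1) (some (-1)) = "") : h = "[]" := by
  apply String.toList_inj.mp
  have hsl : (PySem.Str.slice h (some 1) (some (-1))).toList = [] := by rw [hs]; rfl
  simp only [PySem.Str.toList_slice, PySem.Chars.slice_eq_listSlice] at hsl
  unfold pvIsHdr at hh
  simp only [Bool.and_eq_true, PySem.Str.startswith_eq, PySem.Str.endswith_eq,
    PySem.Chars.startswith_iff, PySem.Chars.endswith_iff] at hh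
  rw [show "[".toList = ['['] from rfl, show "]".toList = [']'] from rfl,
    pv_singleton_prefix, pv_singleton_suffix] at hh
  obtain ⟨hhd, hlast⟩ := hh
  have hlen : (PySem.List.slice h.toList (some 1) (some (-1))).length = 0 := by rw [hsl]; rfl
  rw [PySem.List.length_slice] at hlen
  simp only [PySem.List.clampIdx_neg_one] at hlen
  have h1 : PySem.List.clampIdx h.toList.length 1 = min 1 h.toList.length := by
    exact_mod_cast PySem.List.clampIdx_natCast h.toList.length 1
  rw [h1] at hlen
  cases hl : h.toList with
  | nil => rw [hl] at hhd; simp at hhd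
  | cons a t =>
    rw [hl] at hhd hlast hlen
    simp at hhd; subst hhd
    cases t with
    | nil => simp at hlast
    | cons b t' =>
      cases t' with
      | nil => simp at hlast; subst hlast; rfl
      | cons c t'' => simp at hlen

-- A's loop, as a recursion over already-stripped lines
def pvRunA : pvDD → Option String → List String → pvDD
  | d, _, [] => d
  | d, cur, ln :: rest =>
    if pvIsHdr ln then
      pvRunA (d.insert (PySem.Str.slice ln (some 1) (some (-1))) PySem.Dict.empty)
        (some (PySem.Str.slice ln (some 1) (some (-1)))) rest
    else
      match cur with
      | some p =>
        pvRunA (if PySem.Str.isIn "=" ln && p != "" then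
                  match PySem.Str.splitMax? ln "=" 1 with
                  | some (k :: v :: _) => d.modify p PySem.Dict.empty (fun e => e.insert (PySem.Str.strip k) (PySem.Str.strip v))
                  | _ => d
                else d) (some p) rest
      | none => pvRunA d none rest

-- B's grouping, as a recursion (grpIn: inside an open group; grp: before the first header)
def pvGrpIn : String → List String → List String → List (String × List String)
  | p, body, [] => [(p, body)]
  | p, body, ln :: rest =>
    if pvIsHdr ln then
      (p, body) :: pvGrpIn (PySem.Str.slice ln (some 1) (some (-1))) [] rest
    else pvGrpIn p (body ++ [ln]) rest

def pvGrp : List String → List (String × List String)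
  | [] => []
  | ln :: rest =>
    if pvIsHdr ln then
      pvGrpIn (PySem.Str.slice ln (some 1) (some (-1))) [] rest
    else pvGrp rest

-- A's guarded per-group fill: credentials[name] = {}, body filled only when the name is truthy
def pvGFillGrp (d : pvDD) (g : String × List String) : pvDD :=
  let d' := d.insert g.1 PySem.Dict.empty
  if g.1 != "" then g.2.foldl (pvBFillLine g.1) d' else d'

theorem pvAStep_foldl_eq_runA (lines : List String) (st : pvDD × Option String) :
    (lines.foldl pvAStep st).1 = pvRunA st.1 st.2 (lines.map PySem.Str.strip) := by
  induction lines generalizing st with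
  | nil => rfl
  | cons ln rest ih =>
    rw [List.foldl_cons, List.map_cons, ih]
    show pvRunA (pvAStep st ln).1 (pvAStep st ln).2 _ = _
    simp only [pvAStep, pvRunA, pvIsHdr]
    split
    · rfl
    · cases h : st.2 with
      | none => simp
      | some p =>
        simp only []
        split
        · split <;> rfl
        · rfl

theorem pvAddLast_snoc (gs : List (String × List String)) (p : String) (body : List String) (ln : String) :
    pvAddLast (gs ++ [(p, body)]) ln = gs ++ [(p, body ++ [ln])] := by
  induction gs with
  | nil => rfl
  | cons g rest ih =>
    cases rest with
    | nil => simp [pvAddLast]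
    | cons g' rest' => simp [pvAddLast] at ih ⊢; exact ih

theorem pvBGroup_foldl_in (lines : List String) (gs : List (String × List String))
    (p : String) (body : List String) :
    lines.foldl pvBGroupStep (gs ++ [(p, body)]) = gs ++ pvGrpIn p body lines := by
  induction lines generalizing gs p body with
  | nil => simp [pvGrpIn]
  | cons ln rest ih =>
    rw [List.foldl_cons]
    simp only [pvBGroupStep, pvGrpIn, pvIsHdr]
    split
    · rw [ih (gs ++ [(p, body)])]
      simp
    · have hne : (gs ++ [(p, body)]).isEmpty = false := by simp
      rw [hne]
      simp only [Bool.false_eq_true, if_false, pvAddLast_snoc]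
      exact ih gs p (body ++ [ln])

theorem pvBGroup_foldl (lines : List String) :
    lines.foldl pvBGroupStep [] = pvGrp lines := by
  induction lines with
  | nil => rfl
  | cons ln rest ih =>
    rw [List.foldl_cons]
    simp only [pvBGroupStep, pvGrp, pvIsHdr]
    split
    · have := pvBGroup_foldl_in rest [] (PySem.Str.slice ln (some 1) (some (-1))) []
      simpa using this
    · simpa using ih

-- the crux: A's interleaved pass from an open group equals the batched guarded fill
theorem pvRunA_in (lines : List String) (body : List String) (d : pvDD) (p : String) :
    pvRunA ((if p != "" then body.foldl (pvBFillLine p) (d.insert p PySem.Dict.empty)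
             else d.insert p PySem.Dict.empty)) (some p) lines
      = (pvGrpIn p body lines).foldl pvGFillGrp d := by
  induction lines generalizing body d p with
  | nil =>
    simp only [pvGrpIn, List.foldl_cons, List.foldl_nil]
    rfl
  | cons ln rest ih =>
    simp only [pvGrpIn, pvRunA]
    split
    · -- header line: close group (p, body), open the new one
      rw [List.foldl_cons]
      have hstep : pvGFillGrp d (p, body)
          = (if p != "" then body.foldl (pvBFillLine p) (d.insert p PySem.Dict.empty)
             else d.insert p PySem.Dict.empty) := rfl
      rw [hstep]
      have := ih [] (if p != "" then body.foldl (pvBFillLine p) (d.insert p PySem.Dict.empty)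
                     else d.insert p PySem.Dict.empty) (PySem.Str.slice ln (some 1) (some (-1)))
      simpa using this
    · -- body line: A consumes it now, B appends it to the group body
      by_cases hp : p = ""
      · subst hp
        simp only [bne_self_eq_false, Bool.and_false, Bool.false_eq_true, if_false]
        exact ih (body ++ [ln]) d ""
      · have hb : (p != "") = true := by simpa using hp
        have hih := ih (body ++ [ln]) d p
        simp only [hb, Bool.and_true, if_true] at hih ⊢
        rw [List.foldl_append, List.foldl_cons, List.foldl_nil] at hih
        rw [← hih]
        simp [pvBFillLine]

theorem pvRunA_none (lines : List String) (d : pvDD) :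
    pvRunA d none lines = (pvGrp lines).foldl pvGFillGrp d := by
  induction lines generalizing d with
  | nil => rfl
  | cons ln rest ih =>
    simp only [pvRunA, pvGrp]
    split
    · have := pvRunA_in rest [] d (PySem.Str.slice ln (some 1) (some (-1)))
      simp only [List.foldl_nil] at this
      rw [← this]
      split <;> rfl
    · exact ih d

-- pvGrpIn's first group collects exactly the non-header lines up to the next header
theorem pvGrpIn_eq (lines : List String) (p : String) (body : List String) :
    pvGrpIn p body lines
      = (p, body ++ lines.takeWhile (fun x => !pvIsHdr x)) :: pvGrp (lines.dropWhile (fun x => !pvIsHdr x)) := by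
  induction lines generalizing body with
  | nil => simp [pvGrpIn, pvGrp]
  | cons ln rest ih =>
    by_cases h : pvIsHdr ln = true
    · simp [pvGrpIn, pvGrp, h]
    · have hb : pvIsHdr ln = false := by simpa using h
      simp only [pvGrpIn, hb, Bool.false_eq_true, if_false, ih,
        List.takeWhile_cons, List.dropWhile_cons, Bool.not_false, if_true]
      simp

-- every decomposition of pvGrp s comes from a header line in s: the group collects the following
-- non-header lines, and the later groups are exactly the groups of the remaining lines
theorem pvGrp_decomp (s : List String) (G1 : List (String × List String)) (g : String × List String)
    (G2 : List (String × List String)) (hg : pvGrp s = G1 ++ g :: G2) :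
    ∃ h u, (h :: u) <:+ s ∧ pvIsHdr h = true ∧
      g = (PySem.Str.slice h (some 1) (some (-1)), u.takeWhile (fun x => !pvIsHdr x)) ∧
      G2 = pvGrp (u.dropWhile (fun x => !pvIsHdr x)) := by
  induction hn : s.length using Nat.strong_induction_on generalizing s G1 with
  | _ n ihn =>
    cases s with
    | nil => simp [pvGrp] at hg
    | cons ln rest =>
      by_cases h : pvIsHdr ln = true
      · rw [pvGrp, if_pos h, pvGrpIn_eq] at hg
        cases G1 with
        | nil =>
          simp only [List.nil_append, List.cons.injEq] at hg
          exact ⟨ln, rest, List.suffix_refl _, h, hg.1.symm, hg.2.symm⟩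
        | cons g1 G1' =>
          simp only [List.cons_append, List.cons.injEq] at hg
          have hsuf : rest.dropWhile (fun x => !pvIsHdr x) <:+ rest := List.dropWhile_suffix _
          have hlt : (rest.dropWhile (fun x => !pvIsHdr x)).length < n := by
            have := hsuf.length_le
            simp at hn
            omega
          obtain ⟨h', u', hsf, hh', hgg, hG2⟩ := ihn _ hlt _ _ hg.2 rfl
          exact ⟨h', u', hsf.trans (hsuf.trans (List.suffix_cons ln rest)), hh', hgg, hG2⟩
      · rw [pvGrp, if_neg h] at hg
        have hlt : rest.length < n := by simp at hn; omega
        obtain ⟨h', u', hsf, hh', hgg, hG2⟩ := ihn _ hlt _ _ hg rfl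
        exact ⟨h', u', hsf.trans (List.suffix_cons ln rest), hh', hgg, hG2⟩

-- "[]" is a header line and its name slice is empty
theorem pvHdr_brk : pvIsHdr "[]" = true := by decide
theorem pvSlc_brk : PySem.Str.slice "[]" (some 1) (some (-1)) = "" := by decide

def pvHasE (G : List (String × List String)) : Bool := G.any (fun g => g.1 == "")

-- a "[]" line always produces a group named ""
theorem pvHasE_of_mem (l : List String) (hl : "[]" ∈ l) : pvHasE (pvGrp l) = true := by
  induction hn : l.length using Nat.strong_induction_on generalizing l with
  | _ n ihn =>
    cases l with
    | nil => simp at hl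
    | cons ln rest =>
      by_cases h : pvIsHdr ln = true
      · rw [pvGrp, if_pos h, pvGrpIn_eq]
        by_cases hb : ln = "[]"
        · subst hb
          simp [pvHasE, pvSlc_brk]
        · have hrest : "[]" ∈ rest := by
            rcases List.mem_cons.mp hl with h' | h'
            · exact absurd h'.symm hb
            · exact h'
          have hdw : "[]" ∈ rest.dropWhile (fun x => !pvIsHdr x) := by
            have := List.takeWhile_append_dropWhile (p := fun x => !pvIsHdr x) (l := rest)
            rcases List.mem_append.mp (this ▸ hrest) with h' | h'
            · have := List.mem_takeWhile_imp h'
              simp [pvHdr_brk] at this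
            · exact h'
          have hlt : (rest.dropWhile (fun x => !pvIsHdr x)).length < n := by
            have := (List.dropWhile_suffix (l := rest) (p := fun x => !pvIsHdr x)).length_le
            simp at hn
            omega
          have := ihn _ hlt _ hdw rfl
          simp only [pvHasE, List.any_cons] at this ⊢
          rw [this]
          simp
      · have hrest : "[]" ∈ rest := by
          rcases List.mem_cons.mp hl with h' | h'
          · exact absurd (h' ▸ pvHdr_brk) h
          · exact h'
        rw [pvGrp, if_neg h]
        have hlt : rest.length < n := by simp at hn; omega
        exact ihn _ hlt _ hrest rfl

-- a group named "" always comes from a "[]" line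
theorem pvMem_of_hasE (l : List String) (hE : pvHasE (pvGrp l) = true) : "[]" ∈ l := by
  obtain ⟨g, hg, hge⟩ := List.any_eq_true.mp hE
  obtain ⟨G1, G2, hsplit⟩ := List.append_of_mem hg
  obtain ⟨h, u, hsf, hh, hgg, -⟩ := pvGrp_decomp l G1 g G2 hsplit
  have hsl : PySem.Str.slice h (some 1) (some (-1)) = "" := by
    have : g.1 = PySem.Str.slice h (some 1) (some (-1)) := by rw [hgg]
    rw [← this]
    simpa using hge
  have : h = "[]" := pvEmptyHdr h hh hsl
  exact this ▸ hsf.subset (List.mem_cons_self ..)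

-- splitting s at a header line: the groups of s end with the groups opened at that header
theorem pvGrpIn_split (pre : List String) (h : String) (u : List String) (hh : pvIsHdr h = true) :
    ∀ p body, ∃ G1, pvGrpIn p body (pre ++ h :: u)
      = G1 ++ pvGrpIn (PySem.Str.slice h (some 1) (some (-1))) [] u := by
  induction pre with
  | nil =>
    intro p body
    exact ⟨[(p, body)], by simp [pvGrpIn, hh]⟩
  | cons ln pre' ih =>
    intro p body
    by_cases hl : pvIsHdr ln = true
    · obtain ⟨G1, hG1⟩ := ih (PySem.Str.slice ln (some 1) (some (-1))) []
      exact ⟨(p, body) :: G1, by simp [pvGrpIn, hl, hG1]⟩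
    · obtain ⟨G1, hG1⟩ := ih p (body ++ [ln])
      exact ⟨G1, by simp [pvGrpIn, hl, hG1]⟩

theorem pvGrp_split (pre : List String) (h : String) (u : List String) (hh : pvIsHdr h = true) :
    ∃ G1, pvGrp (pre ++ h :: u)
      = G1 ++ pvGrpIn (PySem.Str.slice h (some 1) (some (-1))) [] u := by
  induction pre with
  | nil => exact ⟨[], by simp [pvGrp, hh]⟩
  | cons ln pre' ih =>
    by_cases hl : pvIsHdr ln = true
    · obtain ⟨G1, hG1⟩ := pvGrpIn_split pre' h u hh (PySem.Str.slice ln (some 1) (some (-1))) []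
      exact ⟨G1, by simp [pvGrp, hl, hG1]⟩
    · obtain ⟨G1, hG1⟩ := ih
      exact ⟨G1, by simp [pvGrp, hl, hG1]⟩

-- filling from a body with no '='-lines is a no-op
theorem pvFill_clean (body : List String) (p : String) (d : pvDD)
    (h : ∀ x ∈ body, PySem.Str.isIn "=" x = false) :
    body.foldl (pvBFillLine p) d = d := by
  induction body generalizing d with
  | nil => rfl
  | cons ln rest ih =>
    rw [List.foldl_cons, pvBFillLine, h ln (by simp), if_neg (by simp)]
    exact ih _ (fun x hx => h x (by simp [hx]))

-- '=' membership in D_'s form and in the programs' form coincide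
theorem pvEff_iff (x : String) : (x.toList.contains '=' = true) ↔ (PySem.Str.isIn "=" x = true) := by
  rw [PySem.Str.isIn_eq, show "=".toList = ['='] from rfl, PySem.Chars.isIn_iff_infix,
    List.singleton_infix_iff]
  simp

-- == DICT VALUE TRACKING ==

-- inserting never leaves an empty dict
theorem pvInsert_ne_nil {κ ν : Type} [BEq κ] (d : PySem.Dict κ ν) (k : κ) (v : ν) :
    (d.insert k v).items ≠ [] := by
  unfold PySem.Dict.insert
  split
  · cases hd : d.items with
    | nil =>
      exfalso
      rename_i hc
      rw [show d = PySem.Dict.mk d.items from rfl, hd] at hc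
      simp at hc
    | cons p r => simp
  · simp

-- "equal except possibly at key ''": same keys in the same order (no duplicates), same values elsewhere
def pvR (d d' : pvDD) : Prop :=
  d.keys = d'.keys ∧ d.keys.Nodup ∧ ∀ k, k ≠ "" → d.get? k = d'.get? k

theorem pvKeysIns (d d' : pvDD) (hk : d.keys = d'.keys) (k : String) (v w : PySem.Dict String String) :
    (d.insert k v).keys = (d'.insert k w).keys := by
  by_cases hc : d.contains k = true
  · have hc' : d'.contains k = true :=
      (PySem.Dict.contains_iff_mem_keys _ _).mpr (hk ▸ (PySem.Dict.contains_iff_mem_keys _ _).mp hc)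
    rw [PySem.Dict.keys_insert_of_contains _ _ hc, PySem.Dict.keys_insert_of_contains _ _ hc', hk]
  · have hc' : ¬ d'.contains k = true := fun h =>
      hc ((PySem.Dict.contains_iff_mem_keys _ _).mpr (hk ▸ (PySem.Dict.contains_iff_mem_keys _ _).mp h))
    rw [PySem.Dict.keys_insert_of_not_contains _ _ (by simpa using hc),
      PySem.Dict.keys_insert_of_not_contains _ _ (by simpa using hc'), hk]

theorem pvR_insert (d d' : pvDD) (hR : pvR d d') (k : String) (v : PySem.Dict String String) :
    pvR (d.insert k v) (d'.insert k v) := by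
  obtain ⟨hk, hnd, hg⟩ := hR
  refine ⟨pvKeysIns d d' hk k v v, PySem.Dict.nodup_keys_insert _ _ _ hnd, ?_⟩
  intro k' hk'
  by_cases he : k' = k
  · subst he; rw [PySem.Dict.get?_insert_self, PySem.Dict.get?_insert_self]
  · rw [PySem.Dict.get?_insert_of_ne _ _ he, PySem.Dict.get?_insert_of_ne _ _ he, hg k' hk']

theorem pvR_insert_right (d d' : pvDD) (hR : pvR d d') (hm : "" ∈ d'.keys)
    (v : PySem.Dict String String) : pvR d (d'.insert "" v) := by
  obtain ⟨hk, hnd, hg⟩ := hR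
  have hc : d'.contains "" = true := (PySem.Dict.contains_iff_mem_keys _ _).mpr hm
  refine ⟨by rw [PySem.Dict.keys_insert_of_contains _ _ hc, hk], hnd, ?_⟩
  intro k' hk'
  rw [PySem.Dict.get?_insert_of_ne _ _ hk', hg k' hk']

theorem pvR_getD (d d' : pvDD) (hR : pvR d d') (k : String) (hk : k ≠ "") (v0 : PySem.Dict String String) :
    d.getD k v0 = d'.getD k v0 := by
  rw [PySem.Dict.getD_eq_get?_getD, PySem.Dict.getD_eq_get?_getD, hR.2.2 k hk]

-- one fill line preserves pvR (same profile p ≠ "" on both sides)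
theorem pvR_fill (body : List String) (p : String) (hp : p ≠ "") (d d' : pvDD) (hR : pvR d d') :
    pvR (body.foldl (pvBFillLine p) d) (body.foldl (pvBFillLine p) d') := by
  induction body generalizing d d' with
  | nil => exact hR
  | cons ln rest ih =>
    rw [List.foldl_cons, List.foldl_cons]
    apply ih
    unfold pvBFillLine
    split
    · split
      · unfold PySem.Dict.modify
        rw [pvR_getD d d' hR p hp]
        exact pvR_insert d d' hR _ _
      · exact hR
    · exact hR

-- filling the '' profile on the right only preserves pvR
theorem pvR_fill_right (body : List String) (d d' : pvDD) (hR : pvR d d') (hm : "" ∈ d'.keys) :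
    pvR d (body.foldl (pvBFillLine "") d') := by
  induction body generalizing d' with
  | nil => exact hR
  | cons ln rest ih =>
    rw [List.foldl_cons]
    have hstep : pvR d (pvBFillLine "" d' ln) ∧ "" ∈ (pvBFillLine "" d' ln).keys := by
      unfold pvBFillLine
      split
      · split
        · unfold PySem.Dict.modify
          constructor
          · exact pvR_insert_right d d' hR hm _
          · exact (PySem.Dict.mem_keys_insert _ _ _ _).mpr (Or.inl rfl)
        · exact ⟨hR, hm⟩
      · exact ⟨hR, hm⟩
    exact ih _ hstep.1 hstep.2

-- a guarded A-step and an unguarded B-step on pvR-related dicts stay pvR-related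
theorem pvR_step (g : String × List String) (d d' : pvDD) (hR : pvR d d') :
    pvR (pvGFillGrp d g) (pvBGroupFill d' g) := by
  by_cases hg : g.1 = ""
  · have h1 : pvGFillGrp d g = d.insert "" PySem.Dict.empty := by
      simp [pvGFillGrp, hg]
    have hR' : pvR (d.insert "" PySem.Dict.empty) (d'.insert "" PySem.Dict.empty) :=
      pvR_insert d d' hR "" PySem.Dict.empty
    have hm : "" ∈ (d'.insert "" PySem.Dict.empty).keys := (PySem.Dict.mem_keys_insert _ _ _ _).mpr (Or.inl rfl)
    rw [h1]
    unfold pvBGroupFill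
    rw [hg]
    exact pvR_fill_right g.2 _ _ hR' hm
  · have hb : (g.1 != "") = true := by simpa using hg
    unfold pvGFillGrp pvBGroupFill
    simp only [hb, if_true]
    exact pvR_fill g.2 g.1 hg _ _ (pvR_insert d d' hR g.1 PySem.Dict.empty)

-- pvR-related dicts become EQUAL after both reset the '' profile
theorem pvR_eq_insert (d d' : pvDD) (hR : pvR d d') :
    d.insert "" PySem.Dict.empty = d'.insert "" PySem.Dict.empty := by
  obtain ⟨hk, hnd, hg⟩ := hR
  have hk' : (d.insert "" PySem.Dict.empty).keys = (d'.insert "" PySem.Dict.empty).keys :=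
    pvKeysIns d d' hk "" PySem.Dict.empty PySem.Dict.empty
  apply PySem.Dict.ext
  rw [PySem.Dict.items_eq_map_keys _ (PySem.Dict.nodup_keys_insert _ _ _ hnd) PySem.Dict.empty,
    PySem.Dict.items_eq_map_keys _ (PySem.Dict.nodup_keys_insert _ _ _ (hk ▸ hnd)) PySem.Dict.empty,
    hk']
  apply List.map_congr_left
  intro k _
  rw [PySem.Dict.getD_eq_get?_getD, PySem.Dict.getD_eq_get?_getD]
  by_cases he : k = ""
  · subst he; rw [PySem.Dict.get?_insert_self, PySem.Dict.get?_insert_self]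
  · rw [PySem.Dict.get?_insert_of_ne _ _ he, PySem.Dict.get?_insert_of_ne _ _ he, hg k he]

-- the cleanliness condition: the LAST group named "" (if any) has no '='-line in its body
def pvC (G : List (String × List String)) : Prop :=
  ∀ G1 g G2, G = G1 ++ g :: G2 → g.1 = "" → pvHasE G2 = false →
    ∀ x ∈ g.2, PySem.Str.isIn "=" x = false

theorem pvC_tail (g : String × List String) (G : List (String × List String))
    (h : pvC (g :: G)) : pvC G :=
  fun G1 g2 G2 hEq => h (g :: G1) g2 G2 (by rw [hEq]; rfl)

-- MAIN UNCHANGED LEMMA: if the last ''-group is clean, the guarded and unguarded folds agree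
theorem pvFold_eq (G : List (String × List String)) (dA dB : pvDD)
    (hC : pvC G) (hR : pvR dA dB) (hE : pvHasE G = false → dA = dB) :
    G.foldl pvGFillGrp dA = G.foldl pvBGroupFill dB := by
  induction G generalizing dA dB with
  | nil => exact hE rfl
  | cons g G' ih =>
    rw [List.foldl_cons, List.foldl_cons]
    by_cases hg : g.1 = ""
    · by_cases hE' : pvHasE G' = true
      · exact ih _ _ (pvC_tail g G' hC) (pvR_step g dA dB hR)
          (fun h => absurd hE' (by simp [h]))
      · have hcl := hC [] g G' rfl hg (by simpa using hE')
        have hA : pvGFillGrp dA g = dA.insert "" PySem.Dict.empty := by simp [pvGFillGrp, hg]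
        have hB : pvBGroupFill dB g = dB.insert "" PySem.Dict.empty := by
          unfold pvBGroupFill
          rw [pvFill_clean g.2 g.1 _ hcl, hg]
        rw [hA, hB, pvR_eq_insert dA dB hR]
        apply ih _ _ (pvC_tail g G' hC)
        · exact ⟨rfl, PySem.Dict.nodup_keys_insert _ _ _ (hR.1 ▸ hR.2.1), fun _ _ => rfl⟩
        · intro; rfl
    · have hstep : pvGFillGrp dB g = pvBGroupFill dB g := by
        unfold pvGFillGrp pvBGroupFill
        simp [show (g.1 != "") = true from by simpa using hg]
      apply ih _ _ (pvC_tail g G' hC) (pvR_step g dA dB hR)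
      intro hE'
      have : dA = dB := hE (by simpa [pvHasE, hg] using hE')
      rw [this, hstep]

-- the head/last-character predicate of D_ is the programs' header predicate
theorem pvHdrFun_eq :
    (fun x : String => !(x.toList.head? == some '[' && x.toList.getLast? == some ']'))
      = (fun x : String => !pvIsHdr x) := by
  funext y; rw [pvHdrB_eq]

-- ¬D_ gives cleanliness of the last ''-group of the parsed group list
theorem pvC_of_notD (content : String)
    (hD : ¬ D_parse_credentials_py content) :
    pvC (pvGrp (((PySem.Str.split? content "\n").getD []).map PySem.Str.strip)) := by
  intro G1 g G2 hEq hg hE x hx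
  by_contra hc
  apply hD
  obtain ⟨h, u, hsf, hh, hgg, hG2⟩ := pvGrp_decomp _ G1 g G2 hEq
  have hsl : PySem.Str.slice h (some 1) (some (-1)) = "" := by
    have : g.1 = PySem.Str.slice h (some 1) (some (-1)) := by rw [hgg]
    rw [← this, hg]
  have hbrk : h = "[]" := pvEmptyHdr h hh hsl
  subst hbrk
  refine ⟨"[]" :: u, (List.mem_tails _ _).mpr hsf, by simp, ?_, ?_⟩
  · -- no later "[]": a later "[]" would give a later ''-group, contradicting pvHasE G2 = false
    simp only [List.tail_cons]
    intro hmem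
    have hdw : "[]" ∈ u.dropWhile (fun x => !pvIsHdr x) := by
      have := List.takeWhile_append_dropWhile (p := fun x => !pvIsHdr x) (l := u)
      rcases List.mem_append.mp (this ▸ hmem) with h' | h'
      · have := List.mem_takeWhile_imp h'
        simp [pvHdr_brk] at this
      · exact h'
    rw [hG2] at hE
    rw [pvHasE_of_mem _ hdw] at hE
    exact absurd hE (by simp)
  · simp only [List.tail_cons, pvHdrFun_eq]
    have hx' : x ∈ u.takeWhile (fun x => !pvIsHdr x) := by
      have : g.2 = u.takeWhile (fun x => !pvIsHdr x) := by rw [hgg]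
      rwa [← this]
    refine List.any_eq_true.mpr ⟨x, hx', ?_⟩
    exact (pvEff_iff x).mpr (by simpa using hc)

-- == B REALLY FILLS: a line containing '=' splits into exactly two parts ==

theorem pvGo0 (sep : List Char) (fuel : Nat) (l cur : List Char) (acc : List (List Char)) :
    PySem.Chars.splitOnMax.go sep fuel 0 l cur acc = ((cur.reverse ++ l) :: acc).reverse := by
  cases fuel with
  | zero => simp [PySem.Chars.splitOnMax.go]
  | succ f =>
    cases l with
    | nil => simp [PySem.Chars.splitOnMax.go]
    | cons c r => simp [PySem.Chars.splitOnMax.go]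

theorem pvGo1 (sep : List Char) (fuel : Nat) (l cur : List Char) (acc : List (List Char))
    (hlen : l.length < fuel) (hex : ∃ j, sep <+: l.drop j) (hsep : sep ≠ []) :
    ∃ a b, PySem.Chars.splitOnMax.go sep fuel 1 l cur acc = acc.reverse ++ [a, b] := by
  induction fuel generalizing l cur with
  | zero => omega
  | succ f ih =>
    cases l with
    | nil =>
      obtain ⟨j, hj⟩ := hex
      simp only [List.drop_nil] at hj
      exact absurd (List.prefix_nil.mp hj) hsep
    | cons c r =>
      by_cases hpre : sep.isPrefixOf (c :: r) = true
      · refine ⟨cur.reverse, List.drop sep.length (c :: r), ?_⟩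
        simp only [PySem.Chars.splitOnMax.go, hpre]
        rw [if_pos trivial, pvGo0]
        simp
      · have hex' : ∃ j, sep <+: r.drop j := by
          obtain ⟨j, hj⟩ := hex
          cases j with
          | zero =>
            exfalso
            exact hpre (List.isPrefixOf_iff_prefix.mpr (by simpa using hj))
          | succ j' => exact ⟨j', by simpa using hj⟩
        obtain ⟨a, b, hab⟩ := ih r (c :: cur) (by simpa using Nat.lt_of_succ_lt_succ hlen) hex'
        refine ⟨a, b, ?_⟩
        simp only [PySem.Chars.splitOnMax.go]
        rw [if_neg (by omega), if_neg (by simp [hpre])]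
        exact hab

theorem pvSplit_two (x : String) (hx : PySem.Str.isIn "=" x = true) :
    ∃ a b, PySem.Str.splitMax? x "=" 1 = some [a, b] := by
  have hx' : PySem.Chars.isIn "=".toList x.toList = true := by
    rw [← PySem.Str.isIn_eq]; exact hx
  have hex : ∃ j, "=".toList <+: x.toList.drop j :=
    (PySem.Chars.exists_prefix_drop_iff_isIn _ _).mpr hx'
  obtain ⟨a, b, hab⟩ := pvGo1 "=".toList (x.toList.length + 1) x.toList [] []
    (by omega) hex (by simp)
  refine ⟨String.ofList a, String.ofList b, ?_⟩
  unfold PySem.Str.splitMax? PySem.Chars.splitMax? PySem.Chars.splitOnMax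
  rw [if_neg (by simp), if_neg (by omega)]
  simp only [Int.toNat_one, hab]
  simp

-- == GET? '' TRACKING THROUGH THE GROUP FOLDS ==

theorem pvFill_get?_ne (body : List String) (p : String) (hp : p ≠ "") (d : pvDD) :
    (body.foldl (pvBFillLine p) d).get? "" = d.get? "" := by
  induction body generalizing d with
  | nil => rfl
  | cons ln rest ih =>
    rw [List.foldl_cons, ih]
    unfold pvBFillLine
    split
    · split
      · unfold PySem.Dict.modify
        rw [PySem.Dict.get?_insert_of_ne _ _ (Ne.symm hp)]
      · rfl
    · rfl

theorem pvFoldA_get? (G : List (String × List String)) (d : pvDD) :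
    (∀ g ∈ G, g.1 ≠ "") → (G.foldl pvGFillGrp d).get? "" = d.get? "" := by
  induction G generalizing d with
  | nil => intro _; rfl
  | cons g G' ih =>
    intro hG
    rw [List.foldl_cons, ih _ (fun g' hg' => hG g' (by simp [hg']))]
    have hg := hG g (by simp)
    unfold pvGFillGrp
    simp only [show (g.1 != "") = true from by simpa using hg, if_true]
    rw [pvFill_get?_ne g.2 g.1 hg, PySem.Dict.get?_insert_of_ne _ _ (Ne.symm hg)]

theorem pvFoldB_get? (G : List (String × List String)) (d : pvDD) :
    (∀ g ∈ G, g.1 ≠ "") → (G.foldl pvBGroupFill d).get? "" = d.get? "" := by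
  induction G generalizing d with
  | nil => intro _; rfl
  | cons g G' ih =>
    intro hG
    rw [List.foldl_cons, ih _ (fun g' hg' => hG g' (by simp [hg']))]
    have hg := hG g (by simp)
    unfold pvBGroupFill
    rw [pvFill_get?_ne g.2 g.1 hg, PySem.Dict.get?_insert_of_ne _ _ (Ne.symm hg)]

-- filling a body with at least one '='-line leaves a non-empty '' profile
theorem pvFill_value (body : List String) (d : pvDD) (v0 : PySem.Dict String String)
    (h0 : d.get? "" = some v0) :
    ∃ v, (body.foldl (pvBFillLine "") d).get? "" = some v ∧
      ((body.any (fun x => PySem.Str.isIn "=" x) = true ∨ v0.items ≠ []) → v.items ≠ []) := by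
  induction body generalizing d v0 with
  | nil => exact ⟨v0, h0, fun h => by simpa using h⟩
  | cons ln rest ih =>
    rw [List.foldl_cons]
    by_cases he : PySem.Str.isIn "=" ln = true
    · obtain ⟨a, b, hab⟩ := pvSplit_two ln he
      have hstep : pvBFillLine "" d ln
          = d.insert "" (v0.insert (PySem.Str.strip a) (PySem.Str.strip b)) := by
        unfold pvBFillLine
        rw [if_pos he, hab]
        unfold PySem.Dict.modify
        rw [PySem.Dict.getD_eq_get?_getD, h0]
        rfl
      rw [hstep]
      obtain ⟨v, hv, himp⟩ := ih _ _ (PySem.Dict.get?_insert_self _ _ _)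
      refine ⟨v, hv, fun _ => himp (Or.inr ?_)⟩
      exact pvInsert_ne_nil v0 _ _
    · have hstep : pvBFillLine "" d ln = d := by
        unfold pvBFillLine
        rw [if_neg he]
      rw [hstep]
      obtain ⟨v, hv, himp⟩ := ih d v0 h0
      refine ⟨v, hv, fun h => himp ?_⟩
      rcases h with h | h
      · simp only [List.any_cons, Bool.or_eq_true] at h
        rcases h with h | h
        · exact absurd h he
        · exact Or.inl h
      · exact Or.inr h

-- == LOOKUP ALONG THE PRINTED ITEMS ==

def pvLookI : List (String × PySem.Dict String String) → String → Option (List (String × String))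
  | [], _ => none
  | (a, b) :: r, k => if a == k then some b.items else pvLookI r k

theorem pvLookI_congr (l1 l2 : List (String × PySem.Dict String String)) (k : String)
    (h : l1.map (fun p => (p.1, p.2.items)) = l2.map (fun p => (p.1, p.2.items))) :
    pvLookI l1 k = pvLookI l2 k := by
  induction l1 generalizing l2 with
  | nil =>
    cases l2 with
    | nil => rfl
    | cons p r => simp at h
  | cons p r ih =>
    cases l2 with
    | nil => simp at h
    | cons q t =>
      simp only [List.map_cons, List.cons.injEq, Prod.mk.injEq] at h
      obtain ⟨⟨h1, h2⟩, h3⟩ := h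
      unfold pvLookI
      rw [h1]
      split
      · rw [h2]
      · exact ih t h3

theorem pvLookI_get? (L : List (String × PySem.Dict String String)) (k : String) :
    pvLookI L k = ((PySem.Dict.mk L).get? k).map (fun d => d.items) := by
  induction L with
  | nil => simp [pvLookI, PySem.Dict.get?]
  | cons p r ih =>
    unfold pvLookI
    rw [show (PySem.Dict.mk (p :: r)) = PySem.Dict.mk ((p.1, p.2) :: r) from by rfl,
      PySem.Dict.get?_mk_cons]
    split
    · rfl
    · exact ih

-- ===== VERDICT (by name: the statement is the Claim_ definition above) =====
theorem parse_credentials_py_spec : Claim_unchanged_parse_credentials_py := by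
  intro content _ hD
  unfold parse_credentials_py parse_credentials_py_alt
  rw [pvAStep_foldl_eq_runA, pvRunA_none]
  show List.map (fun p => (p.1, p.2.items))
      ((pvGrp (List.map PySem.Str.strip ((PySem.Str.split? content "\n").getD []))).foldl
        pvGFillGrp PySem.Dict.empty).items
    = List.map (fun p => (p.1, p.2.items))
      (List.foldl pvBGroupFill PySem.Dict.empty
        (List.foldl pvBGroupStep []
          (List.map PySem.Str.strip ((PySem.Str.split? content "\n").getD [])))).items
  rw [pvBGroup_foldl]
  rw [pvFold_eq _ PySem.Dict.empty PySem.Dict.empty (pvC_of_notD content hD)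
    ⟨rfl, by simp [PySem.Dict.keys_empty], fun _ _ => rfl⟩ (fun _ => rfl)]

theorem parse_credentials_py_changed : Claim_changed_parse_credentials_py := by
  unfold Claim_changed_parse_credentials_py; decide

theorem parse_credentials_py_tight : Claim_exact_parse_credentials_py := by
  intro content _ hD heq
  obtain ⟨t, htails, thead, hnomore, hany⟩ := hD
  -- t = "[]" :: u, a suffix of the stripped lines, with no later "[]"
  cases t with
  | nil => simp at thead
  | cons h u =>
  simp only [List.headD_cons] at thead
  subst thead
  simp only [List.tail_cons] at hnomore hany
  obtain ⟨pre, hpre⟩ := (List.mem_tails _ _).mp htails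
  -- split the group list at this last "[]" header
  obtain ⟨G1, hG1⟩ := pvGrp_split pre "[]" u pvHdr_brk
  rw [pvGrpIn_eq, pvSlc_brk] at hG1
  set s := ((PySem.Str.split? content "\n").getD []).map PySem.Str.strip with hs
  have hsplit : pvGrp s = G1 ++ ("", u.takeWhile (fun x => !pvIsHdr x))
      :: pvGrp (u.dropWhile (fun x => !pvIsHdr x)) := by
    rw [hpre] at hG1
    simpa using hG1
  -- the groups after it have no '' name
  have hG2 : ∀ g ∈ pvGrp (u.dropWhile (fun x => !pvIsHdr x)), g.1 ≠ "" := by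
    intro g hg hge
    apply hnomore
    have hE : pvHasE (pvGrp (u.dropWhile (fun x => !pvIsHdr x))) = true :=
      List.any_eq_true.mpr ⟨g, hg, by simp [hge]⟩
    exact (List.dropWhile_sublist _).subset (pvMem_of_hasE _ hE)
  -- compute A's and B's final '' value
  have heqAB := heq
  unfold parse_credentials_py parse_credentials_py_alt at heqAB
  rw [pvAStep_foldl_eq_runA, pvRunA_none] at heqAB
  have heqAB' : List.map (fun p => (p.1, p.2.items))
      ((pvGrp s).foldl pvGFillGrp PySem.Dict.empty).items
    = List.map (fun p => (p.1, p.2.items))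
      ((List.foldl pvBGroupStep [] s).foldl pvBGroupFill PySem.Dict.empty).items := heqAB
  rw [pvBGroup_foldl] at heqAB'
  rw [hsplit] at heqAB'
  rw [List.foldl_append, List.foldl_append, List.foldl_cons, List.foldl_cons] at heqAB'
  set dA1 := G1.foldl pvGFillGrp PySem.Dict.empty
  set dB1 := G1.foldl pvBGroupFill PySem.Dict.empty
  -- A resets '' and never touches it again
  have hAgrp : pvGFillGrp dA1 ("", u.takeWhile (fun x => !pvIsHdr x))
      = dA1.insert "" PySem.Dict.empty := by simp [pvGFillGrp]
  have hAval : ((pvGrp (u.dropWhile (fun x => !pvIsHdr x))).foldl pvGFillGrp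
      (pvGFillGrp dA1 ("", u.takeWhile (fun x => !pvIsHdr x)))).get? ""
      = some PySem.Dict.empty := by
    rw [hAgrp, pvFoldA_get? _ _ hG2, PySem.Dict.get?_insert_self]
  -- B fills the section, so its '' value is non-empty
  have hanyIs : (u.takeWhile (fun x => !pvIsHdr x)).any (fun x => PySem.Str.isIn "=" x) = true := by
    rw [pvHdrFun_eq] at hany
    obtain ⟨x, hx, hcx⟩ := List.any_eq_true.mp hany
    exact List.any_eq_true.mpr ⟨x, hx, (pvEff_iff x).mp (by simpa using hcx)⟩
  have hBgrp : pvBGroupFill dB1 ("", u.takeWhile (fun x => !pvIsHdr x))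
      = (u.takeWhile (fun x => !pvIsHdr x)).foldl (pvBFillLine "")
          (dB1.insert "" PySem.Dict.empty) := rfl
  obtain ⟨v, hv, hne⟩ := pvFill_value (u.takeWhile (fun x => !pvIsHdr x))
    (dB1.insert "" PySem.Dict.empty) PySem.Dict.empty (PySem.Dict.get?_insert_self _ _ _)
  have hBval : ((pvGrp (u.dropWhile (fun x => !pvIsHdr x))).foldl pvBGroupFill
      (pvBGroupFill dB1 ("", u.takeWhile (fun x => !pvIsHdr x)))).get? ""
      = some v := by
    rw [hBgrp, pvFoldB_get? _ _ hG2]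
    exact hv
  have hvne : v.items ≠ [] := hne (Or.inl hanyIs)
  -- but equal printed items force equal '' values
  have hlook := pvLookI_congr _ _ "" heqAB'
  rw [pvLookI_get?, pvLookI_get?] at hlook
  rw [show (PySem.Dict.mk (((pvGrp (u.dropWhile (fun x => !pvIsHdr x))).foldl pvGFillGrp
      (pvGFillGrp dA1 ("", u.takeWhile (fun x => !pvIsHdr x)))).items))
      = ((pvGrp (u.dropWhile (fun x => !pvIsHdr x))).foldl pvGFillGrp
      (pvGFillGrp dA1 ("", u.takeWhile (fun x => !pvIsHdr x)))) from rfl, hAval] at hlook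
  rw [show (PySem.Dict.mk (((pvGrp (u.dropWhile (fun x => !pvIsHdr x))).foldl pvBGroupFill
      (pvBGroupFill dB1 ("", u.takeWhile (fun x => !pvIsHdr x)))).items))
      = ((pvGrp (u.dropWhile (fun x => !pvIsHdr x))).foldl pvBGroupFill
      (pvBGroupFill dB1 ("", u.takeWhile (fun x => !pvIsHdr x)))) from rfl, hBval] at hlook
  simp only [Option.map_some] at hlook
  exact hvne (by simpa using hlook.symm)
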